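-- pv_equiv track=rewrite | github.com/z00k0/test_task_tetrika | task_3.py | sweep_line_algorithm
-- ===== SOURCE A (Python) =====
-- def sweep_line_algorithm(intervals, max_counter=1):
--     timestamp_and_index_list = []
--
--     for index, value in enumerate(intervals):
--         timestamp_and_index_list.append((value, 1 if index % 2 == 0 else -1))  # начало интервала помечается 1, окончание -1
--     timestamp_and_index_list.sort()
--     max_counter = max_counter
--     prev_counter = 0
--     intersections_timestamps = []
--     for _time, index in timestamp_and_index_list:
--         counter = prev_counter + index
--         if counter == max_counter and prev_counter == max_counter - 1:
--             intersections_timestamps.append(_time)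
--         if counter == max_counter - 1 and prev_counter == max_counter:
--             intersections_timestamps.append(_time)
--         prev_counter = counter
--
--     return intersections_timestamps
-- ===== SOURCE B (Python) =====
-- def sweep_line_algorithm(intervals, max_counter=1):
--     # Split into start timestamps (even indices) and end timestamps (odd indices),
--     # sort each, then merge with two pointers (ends win ties), sweeping a counter.
--     starts, ends = [], []
--     for index, value in enumerate(intervals):
--         (starts if index % 2 == 0 else ends).append(value)
--     starts.sort()
--     ends.sort()
--     res = []
--     prev = 0
--     i = j = 0
--     while i < len(starts) or j < len(ends):
--         if j < len(ends) and (i >= len(starts) or ends[j] <= starts[i]):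
--             t = ends[j]
--             j += 1
--             cur = prev - 1
--         else:
--             t = starts[i]
--             i += 1
--             cur = prev + 1
--         if (cur == max_counter and prev == max_counter - 1) or \
--            (cur == max_counter - 1 and prev == max_counter):
--             res.append(t)
--         prev = cur
--     return res
-- ===== Notes on version B (the rewrite author's own statement) =====
-- stated objective: alternative
-- what changed: Instead of tagging every timestamp with +/-1, sorting the whole tuple list and sweeping it, B splits the flat list into start (even-index) and end (odd-index) timestamps, sorts the two halves separately and merges them with two pointers (ends first on ties), updating the overlap counter and recording threshold crossings during the merge.
import Mathlib
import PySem

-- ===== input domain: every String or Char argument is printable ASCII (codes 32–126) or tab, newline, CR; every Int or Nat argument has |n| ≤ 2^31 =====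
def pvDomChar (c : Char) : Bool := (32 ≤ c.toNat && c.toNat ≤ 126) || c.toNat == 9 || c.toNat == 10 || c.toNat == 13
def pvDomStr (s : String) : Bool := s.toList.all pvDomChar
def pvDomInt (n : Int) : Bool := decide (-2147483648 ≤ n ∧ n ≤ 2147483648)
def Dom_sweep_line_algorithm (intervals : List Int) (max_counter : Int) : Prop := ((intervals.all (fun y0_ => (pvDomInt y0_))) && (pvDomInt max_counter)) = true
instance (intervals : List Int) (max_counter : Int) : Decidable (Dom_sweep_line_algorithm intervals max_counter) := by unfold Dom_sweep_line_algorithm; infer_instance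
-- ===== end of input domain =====

-- B replaces A's tag-everything-then-sort-all-pairs sweep by splitting starts/ends into two
-- separately sorted lists merged with two pointers (ends first on ties); same return value.

-- ===== PORT A =====
def sweep_line_algorithm (intervals : List Int) (max_counter : Int) : List Int :=
  let til : List (Int × Int) :=
    (PySem.List.enumerate intervals).foldl
      (fun acc p => acc ++ [(p.2, if PySem.Int.mod p.1 2 == 0 then (1 : Int) else -1)]) []
  let sortedL := PySem.List.sorted2 til Prod.fst Prod.snd
  let fin := sortedL.foldl
    (fun (st : Int × List Int) ev =>
      let counter := st.1 + ev.2
      let out1 := if counter == max_counter && st.1 == max_counter - 1 then st.2 ++ [ev.1] else st.2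
      let out2 := if counter == max_counter - 1 && st.1 == max_counter then out1 ++ [ev.1] else out1
      (counter, out2)) (0, [])
  fin.2

-- ===== PORT B =====
-- Source B's while loop: the positions i/j in starts/ends are represented by the unconsumed suffixes
def pvMergeSweep (max_counter : Int) : List Int → List Int → Int → List Int → List Int
  | [], [], _, res => res
  | s :: ss, [], prev, res =>
      let cur := prev + 1
      pvMergeSweep max_counter ss [] cur
        (if (cur == max_counter && prev == max_counter - 1)
            || (cur == max_counter - 1 && prev == max_counter) then res ++ [s] else res)
  | [], e :: es, prev, res =>
      let cur := prev - 1
      pvMergeSweep max_counter [] es cur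
        (if (cur == max_counter && prev == max_counter - 1)
            || (cur == max_counter - 1 && prev == max_counter) then res ++ [e] else res)
  | s :: ss, e :: es, prev, res =>
      if e ≤ s then
        let cur := prev - 1
        pvMergeSweep max_counter (s :: ss) es cur
          (if (cur == max_counter && prev == max_counter - 1)
              || (cur == max_counter - 1 && prev == max_counter) then res ++ [e] else res)
      else
        let cur := prev + 1
        pvMergeSweep max_counter ss (e :: es) cur
          (if (cur == max_counter && prev == max_counter - 1)
              || (cur == max_counter - 1 && prev == max_counter) then res ++ [s] else res)
  termination_by ss es => ss.length + es.length

def sweep_line_algorithm_alt (intervals : List Int) (max_counter : Int) : List Int :=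
  let se := (PySem.List.enumerate intervals).foldl
    (fun (se : List Int × List Int) p =>
      if PySem.Int.mod p.1 2 == 0 then (se.1 ++ [p.2], se.2) else (se.1, se.2 ++ [p.2]))
    ([], [])
  let starts := PySem.List.sorted se.1 (fun x => x)
  let ends := PySem.List.sorted se.2 (fun x => x)
  pvMergeSweep max_counter starts ends 0 []

-- ===== PRECONDITION & SPEC =====
def Spec_sweep_line_algorithm (intervals : List Int) (max_counter : Int) (out : List Int) : Prop := out = sweep_line_algorithm_alt intervals max_counter
instance (intervals : List Int) (max_counter : Int) (out : List Int) : Decidable (Spec_sweep_line_algorithm intervals max_counter out) := by unfold Spec_sweep_line_algorithm; infer_instance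

-- ===== CLAIM (what is proved, stated in full; the proofs are below) =====
def Claim_equal_sweep_line_algorithm : Prop := ∀ (intervals : List Int) (max_counter : Int), Dom_sweep_line_algorithm intervals max_counter → Spec_sweep_line_algorithm intervals max_counter (sweep_line_algorithm intervals max_counter)

-- ===== LEMMAS AND PROOFS =====

-- the Python tagging of an enumerated element: (value, +1 at even index / -1 at odd index)
def pvTag (p : Int × Int) : Int × Int := (p.2, if PySem.Int.mod p.1 2 == 0 then (1 : Int) else -1)

-- A's sweep step as a named function (definitionally the lambda in port A)
def pvStepA (M : Int) (st : Int × List Int) (ev : Int × Int) : Int × List Int :=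
  let counter := st.1 + ev.2
  let out1 := if counter == M && st.1 == M - 1 then st.2 ++ [ev.1] else st.2
  let out2 := if counter == M - 1 && st.1 == M then out1 ++ [ev.1] else out1
  (counter, out2)

-- even- and odd-indexed elements of a list
def pvSplit : List Int → List Int × List Int
  | [] => ([], [])
  | x :: xs => ((pvSplit xs).2.cons x, (pvSplit xs).1)

-- the event list produced by B's two-pointer merge order (ends first on ties)
def pvMergeEv : List Int → List Int → List (Int × Int)
  | [], [] => []
  | s :: ss, [] => (s, 1) :: pvMergeEv ss []
  | [], e :: es => (e, -1) :: pvMergeEv [] es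
  | s :: ss, e :: es =>
      if e ≤ s then (e, -1) :: pvMergeEv (s :: ss) es
      else (s, 1) :: pvMergeEv ss (e :: es)
  termination_by ss es => ss.length + es.length

lemma pvStepA_eq (M : Int) (st : Int × List Int) (ev : Int × Int) :
    pvStepA M st ev =
      (st.1 + ev.2,
        if (st.1 + ev.2 == M && st.1 == M - 1) || (st.1 + ev.2 == M - 1 && st.1 == M)
        then st.2 ++ [ev.1] else st.2) := by
  rcases st with ⟨c, out⟩; rcases ev with ⟨t, d⟩
  dsimp [pvStepA]
  split_ifs with h1 h2 h3 h4 h5 h6 h7 <;>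
    simp only [Bool.and_eq_true, Bool.or_eq_true, beq_iff_eq] at * <;>
    first | rfl | (exfalso; omega)

-- B's merge-sweep is A's sweep fold over the merged event list
lemma pvMergeSweep_eq_foldl (M : Int) (ss es : List Int) (prev : Int) (res : List Int) :
    pvMergeSweep M ss es prev res = ((pvMergeEv ss es).foldl (pvStepA M) (prev, res)).2 := by
  fun_induction pvMergeSweep M ss es prev res with
  | case1 prev res => simp [pvMergeEv]
  | case2 s ss prev res cur ih =>
      rw [show pvMergeEv (s :: ss) [] = (s, 1) :: pvMergeEv ss [] from by rw [pvMergeEv],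
        List.foldl_cons, pvStepA_eq]
      exact ih
  | case3 e es prev res cur ih =>
      rw [show pvMergeEv [] (e :: es) = (e, -1) :: pvMergeEv [] es from by rw [pvMergeEv],
        List.foldl_cons, pvStepA_eq]
      exact ih
  | case4 s ss e es prev res h cur ih =>
      rw [show pvMergeEv (s :: ss) (e :: es)
            = if e ≤ s then (e, -1) :: pvMergeEv (s :: ss) es
              else (s, 1) :: pvMergeEv ss (e :: es) from by rw [pvMergeEv],
        if_pos h, List.foldl_cons, pvStepA_eq]
      exact ih
  | case5 s ss e es prev res h cur ih =>
      rw [show pvMergeEv (s :: ss) (e :: es)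
            = if e ≤ s then (e, -1) :: pvMergeEv (s :: ss) es
              else (s, 1) :: pvMergeEv ss (e :: es) from by rw [pvMergeEv],
        if_neg h, List.foldl_cons, pvStepA_eq]
      exact ih

-- the merged event list is a permutation of the two tagged lists
lemma pvMergeEv_perm (ss es : List Int) :
    (pvMergeEv ss es).Perm (ss.map (fun s => (s, 1)) ++ es.map (fun e => (e, -1))) := by
  fun_induction pvMergeEv ss es with
  | case1 => simp
  | case2 s ss ih => simpa using List.Perm.cons (s, (1:Int)) ih
  | case3 e es ih => simpa using List.Perm.cons (e, (-1:Int)) ih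
  | case4 s ss e es h ih =>
      exact (List.Perm.cons (e, (-1:Int)) ih).trans List.perm_middle.symm
  | case5 s ss e es h ih =>
      simpa using List.Perm.cons (s, (1:Int)) ih

lemma pvLexLe_iff (a b : Int × Int) :
    ((toLex a : Int ×ₗ Int) ≤ toLex b) ↔ a.1 < b.1 ∨ (a.1 = b.1 ∧ a.2 ≤ b.2) := Prod.Lex.le_iff

lemma pvMem_pvMergeEv {q : Int × Int} {ss es : List Int} (h : q ∈ pvMergeEv ss es) :
    (∃ v ∈ ss, q = (v, 1)) ∨ (∃ v ∈ es, q = (v, -1)) := by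
  have := (pvMergeEv_perm ss es).mem_iff.mp h
  simp only [List.mem_append, List.mem_map] at this
  rcases this with ⟨v, hv, rfl⟩ | ⟨v, hv, rfl⟩
  · exact Or.inl ⟨v, hv, rfl⟩
  · exact Or.inr ⟨v, hv, rfl⟩

-- the merged event list is sorted in the lexicographic order on (timestamp, tag)
lemma pvMergeEv_pairwise (ss es : List Int)
    (hs : ss.Pairwise (· ≤ ·)) (he : es.Pairwise (· ≤ ·)) :
    (pvMergeEv ss es).Pairwise (fun a b => (toLex a : Int ×ₗ Int) ≤ toLex b) := by
  fun_induction pvMergeEv ss es with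
  | case1 => exact .nil
  | case2 s ss ih =>
      rcases List.pairwise_cons.mp hs with ⟨hall, htail⟩
      refine List.Pairwise.cons ?_ (ih htail he)
      intro q hq
      rcases pvMem_pvMergeEv hq with ⟨v, hv, rfl⟩ | ⟨v, hv, rfl⟩
      · rw [pvLexLe_iff]; have := hall v hv; simp; omega
      · simp at hv
  | case3 e es ih =>
      rcases List.pairwise_cons.mp he with ⟨hall, htail⟩
      refine List.Pairwise.cons ?_ (ih hs htail)
      intro q hq
      rcases pvMem_pvMergeEv hq with ⟨v, hv, rfl⟩ | ⟨v, hv, rfl⟩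
      · simp at hv
      · rw [pvLexLe_iff]; have := hall v hv; simp; omega
  | case4 s ss e es h ih =>
      rcases List.pairwise_cons.mp he with ⟨hall, htail⟩
      refine List.Pairwise.cons ?_ (ih hs htail)
      intro q hq
      rcases pvMem_pvMergeEv hq with ⟨v, hv, rfl⟩ | ⟨v, hv, rfl⟩
      · rcases List.mem_cons.mp hv with rfl | hv'
        · rw [pvLexLe_iff]; simp; omega
        · have := (List.pairwise_cons.mp hs).1 v hv'
          rw [pvLexLe_iff]; simp; omega
      · have := hall v hv
        rw [pvLexLe_iff]; simp; omega
  | case5 s ss e es h ih =>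
      rcases List.pairwise_cons.mp hs with ⟨hall, htail⟩
      refine List.Pairwise.cons ?_ (ih htail he)
      intro q hq
      rcases pvMem_pvMergeEv hq with ⟨v, hv, rfl⟩ | ⟨v, hv, rfl⟩
      · have := hall v hv; rw [pvLexLe_iff]; simp; omega
      · rcases List.mem_cons.mp hv with rfl | hv'
        · rw [pvLexLe_iff]; simp; omega
        · have := (List.pairwise_cons.mp he).1 v hv'
          rw [pvLexLe_iff]; simp; omega

-- Python's tuple comparison is the lexicographic strict order on Int × Int
lemma pvBefore_eq :
    (fun a b : Int × Int => decide (a.1 < b.1) || (!decide (b.1 < a.1) && decide (a.2 < b.2)))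
      = (fun a b : Int × Int => decide ((toLex a : Int ×ₗ Int) < toLex b)) := by
  funext a b
  rcases a with ⟨a1, a2⟩; rcases b with ⟨b1, b2⟩
  simp only [Prod.Lex.lt_iff]
  by_cases h1 : a1 < b1 <;> by_cases h2 : a1 = b1 <;> by_cases h3 : b1 < a1 <;>
    simp_all <;> omega

-- Python's tuple sort is the key sort by the lexicographic order
lemma pvSorted2_eq_sorted_lex (xs : List (Int × Int)) :
    PySem.List.sorted2 xs Prod.fst Prod.snd
      = PySem.List.sorted xs (fun p => (toLex p : Int ×ₗ Int)) := by
  rw [PySem.List.sorted_eq_foldl_insertBy]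
  show List.foldl (fun acc x => PySem.List.insertBy
      (fun a b : Int × Int => decide (a.1 < b.1) || (!decide (b.1 < a.1) && decide (a.2 < b.2))) x acc) [] xs = _
  rw [pvBefore_eq]

lemma pvMod2_succ (s : Int) : (PySem.Int.mod (s+1) 2 == 0) = !(PySem.Int.mod s 2 == 0) := by
  have h1 : PySem.Int.mod (s+1) 2 = (s+1) % 2 := PySem.Int.mod_eq_emod_of_pos (by norm_num)
  have h2 : PySem.Int.mod s 2 = s % 2 := PySem.Int.mod_eq_emod_of_pos (by norm_num)
  rw [h1, h2]
  rcases Int.emod_two_eq s with h | h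
  · have h' : (s+1) % 2 = 1 := by omega
    rw [h, h']; rfl
  · have h' : (s+1) % 2 = 0 := by omega
    rw [h, h']; rfl

-- tagging an enumeration is, up to permutation, tagging the two split halves
lemma pvEnum_tag_perm (xs : List Int) (s : Int) :
    ((PySem.List.enumerate xs s).map pvTag).Perm
      (if PySem.Int.mod s 2 == 0
       then (pvSplit xs).1.map (fun v => (v, 1)) ++ (pvSplit xs).2.map (fun v => (v, -1))
       else (pvSplit xs).1.map (fun v => (v, -1)) ++ (pvSplit xs).2.map (fun v => (v, 1))) := by
  induction xs generalizing s with
  | nil => simp [PySem.List.enumerate_nil, pvSplit]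
  | cons x xs ih =>
      rw [PySem.List.enumerate_cons, List.map_cons]
      have hx : pvTag (s, x) = (x, if PySem.Int.mod s 2 == 0 then (1:Int) else -1) := rfl
      have ihs := ih (s + 1)
      rw [pvMod2_succ] at ihs
      by_cases hp : (PySem.Int.mod s 2 == 0) = true
      · rw [hx, if_pos hp]
        rw [hp] at ihs
        rw [show (!true) = false from rfl] at ihs
        rw [if_neg (by simp)] at ihs
        rw [if_pos hp]
        simp only [pvSplit, List.cons_append, List.map_cons]
        exact List.Perm.cons _ (ihs.trans List.perm_append_comm)
      · rw [hx, if_neg hp]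
        rw [eq_false_of_ne_true hp] at ihs
        rw [show (!false) = true from rfl] at ihs
        rw [if_pos rfl] at ihs
        rw [if_neg hp]
        simp only [pvSplit, List.cons_append, List.map_cons]
        exact List.Perm.cons _ (ihs.trans List.perm_append_comm)

-- B's splitting fold computes the two split halves
lemma pvEnum_split_foldl (xs : List Int) (s : Int) (accS accE : List Int) :
    (PySem.List.enumerate xs s).foldl
      (fun (se : List Int × List Int) p =>
        if PySem.Int.mod p.1 2 == 0 then (se.1 ++ [p.2], se.2) else (se.1, se.2 ++ [p.2]))
      (accS, accE)
      = if PySem.Int.mod s 2 == 0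
        then (accS ++ (pvSplit xs).1, accE ++ (pvSplit xs).2)
        else (accS ++ (pvSplit xs).2, accE ++ (pvSplit xs).1) := by
  induction xs generalizing s accS accE with
  | nil => simp [PySem.List.enumerate_nil, pvSplit]
  | cons x xs ih =>
      rw [PySem.List.enumerate_cons, List.foldl_cons]
      dsimp only
      by_cases hp : (PySem.Int.mod s 2 == 0) = true
      · rw [if_pos hp, if_pos hp, ih (s+1), pvMod2_succ, hp]
        simp [pvSplit]
      · rw [if_neg hp, if_neg hp, ih (s+1), pvMod2_succ, eq_false_of_ne_true hp]
        simp [pvSplit]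

-- A's sorted event list equals B's merged event list
lemma pvSorted_eq_mergeEv (intervals : List Int) :
    PySem.List.sorted2 ((PySem.List.enumerate intervals).map pvTag) Prod.fst Prod.snd
      = pvMergeEv (PySem.List.sorted (pvSplit intervals).1 (fun x => x))
          (PySem.List.sorted (pvSplit intervals).2 (fun x => x)) := by
  rw [pvSorted2_eq_sorted_lex]
  refine PySem.List.eq_of_perm_of_pairwise_le_of_injective
    (fun p : Int × Int => (toLex p : Int ×ₗ Int)) toLex.injective ?_ ?_ ?_
  · refine (PySem.List.sorted_perm _ _ _).trans ?_
    refine ((pvEnum_tag_perm intervals 0).trans ?_).trans (pvMergeEv_perm _ _).symm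
    rw [if_pos (show (PySem.Int.mod 0 2 == 0) = true from rfl)]
    exact List.Perm.append
      ((PySem.List.sorted_perm (pvSplit intervals).1 (fun x => x) false).symm.map _)
      ((PySem.List.sorted_perm (pvSplit intervals).2 (fun x => x) false).symm.map _)
  · exact PySem.List.sorted_pairwise _ _
  · exact pvMergeEv_pairwise _ _
      (PySem.List.sorted_pairwise (pvSplit intervals).1 (fun x => x))
      (PySem.List.sorted_pairwise (pvSplit intervals).2 (fun x => x))

-- ===== VERDICT (by name: the statement is the Claim_ definition above) =====
theorem sweep_line_algorithm_spec : Claim_equal_sweep_line_algorithm := by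
  intro intervals M _
  unfold Spec_sweep_line_algorithm
  have hA : sweep_line_algorithm intervals M
      = ((PySem.List.sorted2 ((PySem.List.enumerate intervals).map pvTag) Prod.fst Prod.snd).foldl
          (pvStepA M) (0, ([] : List Int))).2 := by
    show ((PySem.List.sorted2 ((PySem.List.enumerate intervals).foldl
        (fun acc p => acc ++ [pvTag p]) []) Prod.fst Prod.snd).foldl
          (pvStepA M) (0, ([] : List Int))).2 = _
    rw [PySem.List.foldl_append_singleton_eq_map, List.nil_append]
  have hB : sweep_line_algorithm_alt intervals M
      = pvMergeSweep M (PySem.List.sorted (pvSplit intervals).1 (fun x => x))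
          (PySem.List.sorted (pvSplit intervals).2 (fun x => x)) 0 [] := by
    show pvMergeSweep M
        (PySem.List.sorted ((PySem.List.enumerate intervals).foldl
          (fun (se : List Int × List Int) p =>
            if PySem.Int.mod p.1 2 == 0 then (se.1 ++ [p.2], se.2) else (se.1, se.2 ++ [p.2]))
          ([], [])).1 (fun x => x))
        (PySem.List.sorted ((PySem.List.enumerate intervals).foldl
          (fun (se : List Int × List Int) p =>
            if PySem.Int.mod p.1 2 == 0 then (se.1 ++ [p.2], se.2) else (se.1, se.2 ++ [p.2]))
          ([], [])).2 (fun x => x)) 0 [] = _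
    rw [pvEnum_split_foldl intervals 0 [] [],
      if_pos (show (PySem.Int.mod 0 2 == 0) = true from rfl)]
    simp
  rw [hA, hB, pvMergeSweep_eq_foldl, pvSorted_eq_mergeEv]
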